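-- pv_equiv track=rewrite | github.com/RecSys-Sub470/GeRec | dataset_preprocessing/process_electronics.py | make_inters_in_order
-- ===== SOURCE A (Python) =====
-- import collections
--
-- def make_inters_in_order(inters):
--     user2inters, new_inters = collections.defaultdict(list), list()
--     for inter in inters:
--         user, item, rating, timestamp = inter
--         user2inters[user].append((user, item, rating, timestamp))
--     for user in user2inters:
--         user_inters = user2inters[user]
--         user_inters.sort(key=lambda d: d[3])
--         last_timestamp = 0
--         basket_time = 0
--         for i, inter in enumerate(user_inters):
--             user, item, rating, timestamp = inter
--             if i > 0 and timestamp != last_timestamp: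
--                 basket_time += 1
--             new_inters.append((user, item, rating, timestamp, basket_time))
--             last_timestamp = timestamp
--     return new_inters
-- ===== SOURCE B (Python) =====
-- def make_inters_in_order(inters):
--     user2inters = {}
--     for inter in inters:
--         user2inters.setdefault(inter[0], []).append(inter)
--     new_inters = []
--     for group in user2inters.values():
--         ordered = sorted(group, key=lambda d: d[3])
--         ts = sorted({d[3] for d in ordered})
--         rank = {t: i for i, t in enumerate(ts)}
--         new_inters.extend((user, item, rating, t, rank[t])
--                           for user, item, rating, t in ordered)
--     return new_inters
-- ===== Notes on version B (the rewrite author's own statement) =====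
-- stated objective: alternative
-- what changed: B replaces A's incremental last-timestamp comparison and basket counter by a per-user lookup table: it sorts the distinct timestamps of each user's group and maps each interaction's timestamp to its index in that sorted list via a rank dict.
import Mathlib
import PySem

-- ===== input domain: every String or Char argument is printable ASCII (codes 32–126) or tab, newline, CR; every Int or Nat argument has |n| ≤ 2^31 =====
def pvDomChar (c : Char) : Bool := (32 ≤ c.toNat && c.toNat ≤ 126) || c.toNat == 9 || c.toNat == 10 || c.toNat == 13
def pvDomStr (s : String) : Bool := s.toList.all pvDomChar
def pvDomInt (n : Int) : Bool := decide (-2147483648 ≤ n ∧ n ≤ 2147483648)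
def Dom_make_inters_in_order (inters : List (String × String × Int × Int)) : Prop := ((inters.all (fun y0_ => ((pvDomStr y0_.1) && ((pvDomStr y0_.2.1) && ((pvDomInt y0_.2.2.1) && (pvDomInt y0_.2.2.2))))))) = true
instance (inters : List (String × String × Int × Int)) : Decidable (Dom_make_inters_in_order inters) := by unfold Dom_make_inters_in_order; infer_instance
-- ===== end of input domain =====

-- B replaces A's incremental last-timestamp/basket-counter loop by a per-user rank table
-- (sorted distinct timestamps -> index dict); same return value, alternative structure.

-- ===== PORT A =====
-- A's inner `for i, inter in enumerate(user_inters)` body; state = (new_inters, last_timestamp, basket_time)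
def pvAStep (st : List (String × String × Int × Int × Int) × Int × Int)
    (q : Int × (String × String × Int × Int)) : List (String × String × Int × Int × Int) × Int × Int :=
  let basket_time' := if 0 < q.1 ∧ q.2.2.2.2 ≠ st.2.1 then st.2.2 + 1 else st.2.2
  (st.1 ++ [(q.2.1, q.2.2.1, q.2.2.2.1, q.2.2.2.2, basket_time')], q.2.2.2.2, basket_time')

def make_inters_in_order (inters : List (String × String × Int × Int)) : List (String × String × Int × Int × Int) :=
  -- user2inters = defaultdict(list); user2inters[user].append((user, item, rating, timestamp))
  let user2inters : PySem.Dict String (List (String × String × Int × Int)) :=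
    inters.foldl (fun d inter => d.modify inter.1 [] (fun l => l ++ [inter])) PySem.Dict.empty
  -- `for user in user2inters: user_inters = user2inters[user]` — keys are unique, so the
  -- key/value pairs of .items are exactly (user, user2inters[user])
  user2inters.items.foldl (fun new_inters p =>
    ((PySem.List.enumerate (PySem.List.sorted p.2 (fun d => d.2.2.2)) 0).foldl pvAStep (new_inters, 0, 0)).1) []

-- ===== PORT B =====
-- rank = {t: i for i, t in enumerate(ts)}
def pvRank (ts : List Int) : PySem.Dict Int Int :=
  (PySem.List.enumerate ts 0).foldl (fun d q => d.insert q.2 q.1) PySem.Dict.empty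

def make_inters_in_order_alt (inters : List (String × String × Int × Int)) : List (String × String × Int × Int × Int) :=
  let user2inters : PySem.Dict String (List (String × String × Int × Int)) :=
    inters.foldl (fun d inter => d.modify inter.1 [] (fun l => l ++ [inter])) PySem.Dict.empty
  user2inters.values.foldl (fun new_inters group =>
    let ordered := PySem.List.sorted group (fun d => d.2.2.2)
    let ts := PySem.List.sorted (PySem.Set.ofList (ordered.map (fun d => d.2.2.2))) (fun t => t)
    -- rank[t] : t is always a key of rank here, so the Python lookup never raises; getD is exact
    new_inters ++ ordered.map (fun d => (d.1, d.2.1, d.2.2.1, d.2.2.2, (pvRank ts).getD d.2.2.2 0))) []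

-- ===== PRECONDITION & SPEC =====
def Spec_make_inters_in_order (inters : List (String × String × Int × Int)) (out : List (String × String × Int × Int × Int)) : Prop := out = make_inters_in_order_alt inters
instance (inters : List (String × String × Int × Int)) (out : List (String × String × Int × Int × Int)) : Decidable (Spec_make_inters_in_order inters out) := by unfold Spec_make_inters_in_order; infer_instance

-- ===== CLAIM (what is proved, stated in full; the proofs are below) =====
def Claim_equal_make_inters_in_order : Prop := ∀ (inters : List (String × String × Int × Int)), Dom_make_inters_in_order inters → Spec_make_inters_in_order inters (make_inters_in_order inters)

-- ===== LEMMAS AND PROOFS =====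

-- A's inner loop, restated as structural recursion (positions i ≥ 1: the i > 0 test is always true)
def pvARun (last b : Int) : List (String × String × Int × Int) → List (String × String × Int × Int × Int)
  | [] => []
  | x :: xs =>
    let b' := if x.2.2.2 ≠ last then b + 1 else b
    (x.1, x.2.1, x.2.2.1, x.2.2.2, b') :: pvARun x.2.2.2 b' xs

-- the whole inner loop: the first element always gets basket 0
def pvARun0 : List (String × String × Int × Int) → List (String × String × Int × Int × Int)
  | [] => []
  | x :: xs => (x.1, x.2.1, x.2.2.1, x.2.2.2, 0) :: pvARun x.2.2.2 0 xs

theorem pvAStep_tail (l : List (String × String × Int × Int)) :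
    ∀ (acc : List (String × String × Int × Int × Int)) (last b s : Int), 1 ≤ s →
    ((PySem.List.enumerate l s).foldl pvAStep (acc, last, b)).1 = acc ++ pvARun last b l := by
  induction l with
  | nil => intro acc last b s _; simp [PySem.List.enumerate_nil, pvARun]
  | cons x xs ih =>
    intro acc last b s hs
    rw [PySem.List.enumerate_cons, List.foldl_cons]
    by_cases hx : x.2.2.2 ≠ last
    · have : pvAStep (acc, last, b) (s, x)
          = (acc ++ [(x.1, x.2.1, x.2.2.1, x.2.2.2, b + 1)], x.2.2.2, b + 1) := by
        simp [pvAStep, hx]; omega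
      rw [this, ih _ _ _ _ (by omega)]
      simp [pvARun, hx]
    · rw [not_ne_iff] at hx
      have : pvAStep (acc, last, b) (s, x)
          = (acc ++ [(x.1, x.2.1, x.2.2.1, x.2.2.2, b)], x.2.2.2, b) := by
        simp [pvAStep, hx]
      rw [this, ih _ _ _ _ (by omega)]
      simp [pvARun, hx]

theorem pvAStep_full (l : List (String × String × Int × Int))
    (acc : List (String × String × Int × Int × Int)) :
    ((PySem.List.enumerate l 0).foldl pvAStep (acc, 0, 0)).1 = acc ++ pvARun0 l := by
  cases l with
  | nil => simp [PySem.List.enumerate_nil, pvARun0]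
  | cons x xs =>
    rw [PySem.List.enumerate_cons, List.foldl_cons]
    have : pvAStep (acc, 0, 0) (0, x)
        = (acc ++ [(x.1, x.2.1, x.2.2.1, x.2.2.2, 0)], x.2.2.2, 0) := by
      simp [pvAStep]
    rw [this, pvAStep_tail _ _ _ _ _ (by omega)]
    simp [pvARun0]

-- the rank dict maps each element of a duplicate-free list to its index
theorem pvRank_getD (t : Int) :
    ∀ (ts : List Int) (d : PySem.Dict Int Int) (s : Int), ts.Nodup →
    ((PySem.List.enumerate ts s).foldl (fun d q => d.insert q.2 q.1) d).getD t 0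
      = if t ∈ ts then s + (ts.idxOf t : Int) else d.getD t 0 := by
  intro ts
  induction ts with
  | nil => intro d s _; simp [PySem.List.enumerate_nil]
  | cons x ts ih =>
    intro d s hnd
    rw [PySem.List.enumerate_cons, List.foldl_cons]
    have hnd' : ts.Nodup := hnd.of_cons
    have hx : x ∉ ts := (List.nodup_cons.mp hnd).1
    rw [ih _ (s + 1) hnd']
    by_cases ht : t ∈ ts
    · have hne : x ≠ t := fun h => hx (h ▸ ht)
      simp [ht, hne, List.mem_cons.mpr (Or.inr ht)]
      ring
    · rw [if_neg ht, PySem.Dict.getD_insert]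
      by_cases htx : t = x
      · subst htx
        simp
      · have : t ∉ x :: ts := by simp [htx, ht]
        simp [htx, this]

-- in a strictly increasing list, an element with nothing of the list strictly between
-- it and a smaller member sits exactly one position later
theorem pvIdxOf_succ (a c : Int) :
    ∀ (ts : List Int), ts.Pairwise (· < ·) → a ∈ ts → c ∈ ts → a < c →
    (∀ u ∈ ts, u ≤ a ∨ c ≤ u) → ts.idxOf c = ts.idxOf a + 1 := by
  intro ts
  induction ts with
  | nil => intro _ ha; cases ha
  | cons x rest ih =>
    intro hpw ha hc hlt hmid
    have hxr : ∀ y ∈ rest, x < y := fun y hy => (List.pairwise_cons.mp hpw).1 y hy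
    have hpw' : rest.Pairwise (· < ·) := (List.pairwise_cons.mp hpw).2
    by_cases hax : a = x
    · subst hax
      have hca : c ≠ a := by omega
      have hcr : c ∈ rest := by
        rcases List.mem_cons.mp hc with h | h
        · exact absurd h hca
        · exact h
      obtain ⟨h, r, rfl⟩ := List.exists_cons_of_ne_nil (List.ne_nil_of_mem hcr)
      have hch : c = h := by
        have h1 : c ≤ h := by
          rcases hmid h (by simp) with h' | h'
          · exact absurd h' (by have := hxr h (by simp); omega)
          · exact h'
        rcases List.mem_cons.mp hcr with h2 | h2
        · omega
        · have := (List.pairwise_cons.mp hpw').1 c h2; omega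
      subst hch
      have hac : a ≠ c := by omega
      simp [hac]
    · have har : a ∈ rest := by
        rcases List.mem_cons.mp ha with h | h
        · exact absurd h hax
        · exact h
      have hxc : x ≠ c := by
        intro h; subst h
        have := hxr a har; omega
      have hcr : c ∈ rest := by
        rcases List.mem_cons.mp hc with h | h
        · exact absurd h.symm hxc
        · exact h
      have hxa : x ≠ a := fun h => hax h.symm
      have h1 : (x == c) = false := beq_eq_false_iff_ne.mpr hxc
      have h2 : (x == a) = false := beq_eq_false_iff_ne.mpr hxa
      rw [List.idxOf_cons, List.idxOf_cons, h1, h2]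
      simp [ih hpw' har hcr hlt (fun u hu => hmid u (by simp [hu]))]

-- core invariant: once `last` is the previous timestamp and basket = idxOf last,
-- A's counter loop produces exactly the rank of each timestamp
theorem pvCore :
    ∀ (o : List (String × String × Int × Int)) (ts : List Int) (last : Int),
    ts.Pairwise (· < ·) → last ∈ ts →
    (∀ x ∈ o, x.2.2.2 ∈ ts) →
    (∀ u ∈ ts, u ≤ last ∨ u ∈ o.map (fun d => d.2.2.2)) →
    o.Pairwise (fun a b => a.2.2.2 ≤ b.2.2.2) →
    (∀ x ∈ o, last ≤ x.2.2.2) →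
    pvARun last (ts.idxOf last : Int) o
      = o.map (fun d => (d.1, d.2.1, d.2.2.1, d.2.2.2, (ts.idxOf d.2.2.2 : Int))) := by
  intro o
  induction o with
  | nil => intros; simp [pvARun]
  | cons x xs ih =>
    intro ts last hpw hlast hin hmid hsorted hge
    have hxts : x.2.2.2 ∈ ts := hin x (by simp)
    have hxs_sorted : xs.Pairwise (fun a b => a.2.2.2 ≤ b.2.2.2) := (List.pairwise_cons.mp hsorted).2
    have hxle : ∀ y ∈ xs, x.2.2.2 ≤ y.2.2.2 := (List.pairwise_cons.mp hsorted).1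
    by_cases hx : x.2.2.2 ≠ last
    · have hlt : last < x.2.2.2 := lt_of_le_of_ne (hge x (by simp)) (Ne.symm hx)
      have hidx : ts.idxOf x.2.2.2 = ts.idxOf last + 1 := by
        apply pvIdxOf_succ last x.2.2.2 ts hpw hlast hxts hlt
        intro u hu
        rcases hmid u hu with h | h
        · exact Or.inl h
        · rcases List.mem_map.mp h with ⟨y, hy, rfl⟩
          rcases List.mem_cons.mp hy with h' | h'
          · exact Or.inr (le_of_eq (by rw [h']))
          · exact Or.inr (hxle y h')
      have hrec := ih ts x.2.2.2 hpw hxts (fun y hy => hin y (by simp [hy]))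
        (fun u hu => by
          rcases hmid u hu with h | h
          · exact Or.inl (le_trans h (le_of_lt hlt))
          · rcases List.mem_map.mp h with ⟨y, hy, rfl⟩
            rcases List.mem_cons.mp hy with h' | h'
            · exact Or.inl (le_of_eq (by rw [h']))
            · exact Or.inr (List.mem_map.mpr ⟨y, h', rfl⟩))
        hxs_sorted hxle
      have harg : ((ts.idxOf last : Int) + 1) = (ts.idxOf x.2.2.2 : Int) := by omega
      simp only [pvARun, List.map_cons]
      rw [if_pos hx, harg, hrec]
    · rw [not_ne_iff] at hx
      have hrec := ih ts last hpw hlast (fun y hy => hin y (by simp [hy]))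
        (fun u hu => by
          rcases hmid u hu with h | h
          · exact Or.inl h
          · rcases List.mem_map.mp h with ⟨y, hy, rfl⟩
            rcases List.mem_cons.mp hy with h' | h'
            · exact Or.inl (le_of_eq (by rw [h', hx]))
            · exact Or.inr (List.mem_map.mpr ⟨y, h', rfl⟩))
        hxs_sorted (fun y hy => le_trans (hge x (by simp)) (hxle y hy))
      simp only [pvARun, List.map_cons]
      rw [if_neg (not_ne_iff.mpr hx), hx, hrec]

-- per-group equality: A's counter loop over the sorted group = B's rank-table map
theorem pvGroup (g : List (String × String × Int × Int)) :
    pvARun0 (PySem.List.sorted g (fun d => d.2.2.2))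
      = (PySem.List.sorted g (fun d => d.2.2.2)).map (fun d =>
          (d.1, d.2.1, d.2.2.1, d.2.2.2,
            (pvRank (PySem.List.sorted
              (PySem.Set.ofList ((PySem.List.sorted g (fun d => d.2.2.2)).map (fun d => d.2.2.2)))
              (fun t => t))).getD d.2.2.2 0)) := by
  set o := PySem.List.sorted g (fun d => d.2.2.2) with ho
  set ts := PySem.List.sorted
      (PySem.Set.ofList (o.map (fun d => d.2.2.2))) (fun t => t) with hts
  have hpw : ts.Pairwise (· < ·) := PySem.List.sorted_ofList_pairwise_lt _
  have hnd : ts.Nodup := hpw.nodup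
  have hmem : ∀ u : Int, u ∈ ts ↔ u ∈ o.map (fun d => d.2.2.2) := by
    intro u
    rw [hts, PySem.List.mem_sorted, PySem.Set.mem_ofList]
  have hrank : ∀ t ∈ ts, (pvRank ts).getD t 0 = (ts.idxOf t : Int) := by
    intro t htin
    unfold pvRank
    rw [pvRank_getD t ts PySem.Dict.empty 0 hnd, if_pos htin, zero_add]
  have hsorted : o.Pairwise (fun a b => a.2.2.2 ≤ b.2.2.2) := by
    rw [ho]; exact PySem.List.sorted_pairwise g _
  cases h : o with
  | nil => simp [pvARun0]
  | cons x xs =>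
    have hxts : x.2.2.2 ∈ ts := (hmem _).mpr (by rw [h]; simp)
    have hxle : ∀ y ∈ xs, x.2.2.2 ≤ y.2.2.2 := by
      have := hsorted; rw [h] at this
      exact (List.pairwise_cons.mp this).1
    have hts_ge : ∀ u ∈ ts, x.2.2.2 ≤ u := by
      intro u hu
      rcases List.mem_map.mp ((hmem u).mp hu) with ⟨y, hy, rfl⟩
      rw [h] at hy
      rcases List.mem_cons.mp hy with h' | h'
      · rw [h']
      · exact hxle y h'
    have hidx0 : ts.idxOf x.2.2.2 = 0 := by
      obtain ⟨hh, r, hr⟩ := List.exists_cons_of_ne_nil (List.ne_nil_of_mem hxts)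
      have hhx : hh = x.2.2.2 := by
        have h1 : x.2.2.2 ≤ hh := hts_ge hh (by rw [hr]; simp)
        rw [hr] at hxts hpw
        rcases List.mem_cons.mp hxts with h2 | h2
        · omega
        · have := (List.pairwise_cons.mp hpw).1 _ h2; omega
      rw [hr, hhx, List.idxOf_cons]; simp
    have hcore := pvCore xs ts x.2.2.2 hpw hxts
      (fun y hy => (hmem _).mpr (by
        rw [h]; exact List.mem_map.mpr ⟨y, by simp [hy], rfl⟩))
      (fun u hu => by
        rcases List.mem_map.mp ((hmem u).mp hu) with ⟨y, hy, rfl⟩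
        rw [h] at hy
        rcases List.mem_cons.mp hy with h' | h'
        · exact Or.inl (le_of_eq (by rw [h']))
        · exact Or.inr (List.mem_map.mpr ⟨y, h', rfl⟩))
      (by have := hsorted; rw [h] at this; exact (List.pairwise_cons.mp this).2)
      hxle
    have hmapeq : xs.map (fun d => (d.1, d.2.1, d.2.2.1, d.2.2.2, (pvRank ts).getD d.2.2.2 0))
        = xs.map (fun d => (d.1, d.2.1, d.2.2.1, d.2.2.2, (ts.idxOf d.2.2.2 : Int))) := by
      apply List.map_congr_left
      intro y hy
      have hyts : y.2.2.2 ∈ ts :=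
        (hmem _).mpr (by rw [h]; exact List.mem_map.mpr ⟨y, by simp [hy], rfl⟩)
      rw [hrank _ hyts]
    have harg : ((ts.idxOf x.2.2.2 : Nat) : Int) = 0 := by omega
    rw [harg] at hcore
    simp only [pvARun0, List.map_cons]
    rw [hmapeq, hrank _ hxts, harg, hcore]

-- ===== VERDICT (by name: the statement is the Claim_ definition above) =====
theorem make_inters_in_order_spec : Claim_equal_make_inters_in_order := by
  intro inters _
  unfold Spec_make_inters_in_order make_inters_in_order make_inters_in_order_alt
  simp only [PySem.Dict.values]
  rw [List.foldl_map]
  apply PySem.List.foldl_congr_mem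
  intro acc p _
  rw [pvAStep_full, pvGroup]
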